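-- pv_equiv track=rewrite | github.com/raeez/chiral-bar-cobar | compute/lib/w_infinity_string_engine.py | bosonic_string_spectrum_level
-- ===== SOURCE A (Python) =====
-- from typing import Dict, List, Optional, Tuple
--
-- def bosonic_string_spectrum_level(max_level: int = 5) -> List[Dict[str, object]]:
--     """Level-by-level count of bosonic string states at c = 26.
--
--     At level n, the number of transverse oscillation states is
--     the number of partitions of n into parts from {1, 2, 3, ...}
--     raised to the power 24 (transverse dimensions = 26 - 2 = 24).
--
--     Actually: the partition function is
--       prod_{n>=1} 1/(1-q^n)^{24}
--
--     so the coefficient of q^n is p_{24}(n) = number of partitions of n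
--     using 24 colors (equivalently, 24-component oscillators).
--
--     Level 0: tachyon (1 state)
--     Level 1: massless vector (24 states = dim of transverse space)
--     Level 2: massive (24*25/2 + 24 = 324 states)
--     """
--     # Build the generating function prod_{n>=1} 1/(1-q^n)^{24}
--     # by iteratively multiplying 1/(1-q^n) 24 times for each n.
--     coeffs = [0] * (max_level + 1)
--     coeffs[0] = 1
--
--     for part in range(1, max_level + 1):
--         for _ in range(24):  # 24 transverse dimensions
--             for j in range(part, max_level + 1):
--                 coeffs[j] += coeffs[j - part]
--
--     result = []
--     for n in range(max_level + 1):
--         result.append({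
--             "level": n,
--             "states": coeffs[n],
--             "mass_squared": n - 1,  # alpha' m^2 = n - 1 (tachyon at level 0)
--         })
--     return result
-- ===== SOURCE B (Python) =====
-- def bosonic_string_spectrum_level(max_level: int = 5):
--     """Compute the one-colour partition numbers once (one weighted-sum pass per
--     part), then raise to the twenty-fourth power by repeated squaring of
--     convolutions: square four times, then multiply the last two squarings."""
--     N = max_level
--     P = [0] * (N + 1)
--     P[0] = 1
--     for part in range(1, N + 1):
--         P = [sum(P[j - part * k] for k in range(j // part + 1))
--              for j in range(N + 1)]
--
--     def conv(a, b):
--         return [sum(a[j] * b[n - j] for j in range(n + 1)) for n in range(N + 1)]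
--
--     P2 = conv(P, P)
--     P4 = conv(P2, P2)
--     P8 = conv(P4, P4)
--     P16 = conv(P8, P8)
--     c = conv(P16, P8)
--     return [{"level": n, "states": c[n], "mass_squared": n - 1}
--             for n in range(N + 1)]
-- ===== Notes on version B (the rewrite author's own statement) =====
-- stated objective: alternative
-- what changed: B computes the one-colour partition generating function once (a weighted-sum pass per part) and then raises it to the twenty-fourth power by repeated squaring of convolutions, instead of A's twenty-four in-place Euler passes per part.
import Mathlib
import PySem

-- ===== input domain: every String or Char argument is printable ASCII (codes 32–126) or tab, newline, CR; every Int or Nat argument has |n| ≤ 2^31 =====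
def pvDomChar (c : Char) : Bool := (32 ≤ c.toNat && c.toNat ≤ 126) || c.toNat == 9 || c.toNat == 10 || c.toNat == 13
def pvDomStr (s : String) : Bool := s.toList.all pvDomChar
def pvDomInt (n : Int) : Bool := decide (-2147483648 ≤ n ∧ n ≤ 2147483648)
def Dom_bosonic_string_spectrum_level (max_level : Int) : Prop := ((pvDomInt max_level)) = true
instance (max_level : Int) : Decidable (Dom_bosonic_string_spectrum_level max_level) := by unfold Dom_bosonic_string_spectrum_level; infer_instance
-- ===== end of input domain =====

-- B computes the one-colour partition series once, then its twenty-fourth power by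
-- repeated squaring of convolutions, instead of A's twenty-four in-place Euler passes
-- per part (alternative algorithm, similar cost).


-- ===== PORT A =====
-- literal transliteration of A: coeffs list, for each part from one to N apply twenty-four in-place
-- Euler passes coeffs[j] += coeffs[j-part] (j = part..N), then build the records.
def bosonic_string_spectrum_level (max_level : Int) : List (List (String × Int)) :=
  let N := max_level.toNat
  let coeffs0 : List Int := (List.replicate (N + 1) 0).set 0 1
  let coeffs := (List.range' 1 N).foldl (fun c part =>
      (List.range 24).foldl (fun c _ =>
        (List.range' part (N + 1 - part)).foldl
          (fun c j => c.set j (c.getD j 0 + c.getD (j - part) 0)) c) c) coeffs0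
  (List.range (N + 1)).map (fun (n : Nat) =>
    [("level", (n : Int)), ("states", coeffs.getD n 0), ("mass_squared", (n : Int) - 1)])

-- ===== PORT B =====
-- literal transliteration of B: one-colour partition numbers P built out-of-place,
-- one weighted-sum comprehension per part; then its twenty-fourth power by repeated squaring of
-- convolutions P2 = P*P, P4, P8, P16, c = P16*P8; then build the records.
def bosonic_string_spectrum_level_alt (max_level : Int) : List (List (String × Int)) :=
  let N := max_level.toNat
  let P0 : List Int := (List.replicate (N + 1) 0).set 0 1
  let P := (List.range' 1 N).foldl (fun P part =>
      (List.range (N + 1)).map (fun j =>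
        (List.range (j / part + 1)).foldl (fun s k => s + P.getD (j - part * k) 0) 0)) P0
  let conv := fun (a b : List Int) =>
      (List.range (N + 1)).map (fun n =>
        (List.range (n + 1)).foldl (fun s j => s + a.getD j 0 * b.getD (n - j) 0) 0)
  let P2 := conv P P
  let P4 := conv P2 P2
  let P8 := conv P4 P4
  let P16 := conv P8 P8
  let c := conv P16 P8
  (List.range (N + 1)).map (fun (n : Nat) =>
    [("level", (n : Int)), ("states", c.getD n 0), ("mass_squared", (n : Int) - 1)])

-- ===== PRECONDITION & SPEC =====
-- Pre_ excludes negative max_level, where A raises IndexError (coeffs[0] = 1 on an empty list).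
def Pre_bosonic_string_spectrum_level (max_level : Int) : Prop := 0 ≤ max_level
instance (max_level : Int) : Decidable (Pre_bosonic_string_spectrum_level max_level) := by
  unfold Pre_bosonic_string_spectrum_level; infer_instance

def pvWitness_bosonic_string_spectrum_level : Int := 3

def Spec_bosonic_string_spectrum_level (max_level : Int) (out : List (List (String × Int))) : Prop := out = bosonic_string_spectrum_level_alt max_level
instance (max_level : Int) (out : List (List (String × Int))) : Decidable (Spec_bosonic_string_spectrum_level max_level out) := by unfold Spec_bosonic_string_spectrum_level; infer_instance

-- ===== CLAIM (what is proved, stated in full; the proofs are below) =====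
def Claim_equal_bosonic_string_spectrum_level : Prop := ∀ (max_level : Int), Dom_bosonic_string_spectrum_level max_level → Pre_bosonic_string_spectrum_level max_level → Spec_bosonic_string_spectrum_level max_level (bosonic_string_spectrum_level max_level)

-- ===== LEMMAS AND PROOFS =====

-- one Euler factor 1/(1-q^p): pvP p f j = ∑_{k ≤ j/p} f (j - p k)
def pvP (p : ℕ) (f : ℕ → ℤ) (j : ℕ) : ℤ :=
  ∑ k ∈ Finset.range (j / p + 1), f (j - p * k)

-- the geometric series ∑_k X^{p k}
def pvG (p : ℕ) : PowerSeries ℤ :=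
  PowerSeries.mk (fun m => if p ∣ m then 1 else 0)

-- "list c agrees with the coefficients of S up to degree N"
def pvCoe (N : ℕ) (c : List Int) (S : PowerSeries ℤ) : Prop :=
  c.length = N + 1 ∧ ∀ i, i ≤ N → c.getD i 0 = PowerSeries.coeff i S

lemma pvGetD_set (c : List Int) (j i : ℕ) (v : Int) :
    (c.set j v).getD i 0 = if j = i ∧ j < c.length then v else c.getD i 0 := by
  simp only [List.getD_eq_getElem?_getD, List.getElem?_set]
  by_cases h : j = i
  · subst h
    by_cases hl : j < c.length <;> simp [hl]
  · simp [h]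

lemma pvP_lt {p j : ℕ} (f : ℕ → ℤ) (h : j < p) : pvP p f j = f j := by
  unfold pvP
  rw [Nat.div_eq_of_lt h]
  simp

lemma pvP_rec {p j : ℕ} (f : ℕ → ℤ) (hp : 0 < p) (h : p ≤ j) :
    pvP p f j = f j + pvP p f (j - p) := by
  unfold pvP
  rw [Nat.div_eq_sub_div hp h, Finset.sum_range_succ' (fun k => f (j - p * k))]
  simp only [Nat.mul_zero, Nat.sub_zero]
  rw [add_comm]
  congr 1
  refine Finset.sum_congr rfl (fun k _ => ?_)
  congr 1
  rw [Nat.mul_succ, Nat.sub_sub, Nat.add_comm]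

lemma pvP_congr {p j : ℕ} {f g : ℕ → ℤ} (h : ∀ i, i ≤ j → f i = g i) :
    pvP p f j = pvP p g j := by
  unfold pvP
  exact Finset.sum_congr rfl (fun k _ => h _ (Nat.sub_le _ _))

-- foldl of additions over range = Finset.sum
lemma pvFoldSum (g : ℕ → ℤ) : ∀ (n : ℕ) (s : ℤ),
    (List.range n).foldl (fun s k => s + g k) s = s + ∑ k ∈ Finset.range n, g k := by
  intro n
  induction n with
  | zero => simp
  | succ n ih =>
    intro s
    rw [List.range_succ, List.foldl_append, ih, Finset.sum_range_succ]
    simp [add_assoc]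

-- coefficient of a product of two mk-series as a range sum
lemma pvCoeff_mul (f g : ℕ → ℤ) (n : ℕ) :
    PowerSeries.coeff n (PowerSeries.mk f * PowerSeries.mk g)
      = ∑ j ∈ Finset.range (n + 1), f j * g (n - j) := by
  rw [PowerSeries.coeff_mul, Finset.Nat.sum_antidiagonal_eq_sum_range_succ_mk]
  simp [PowerSeries.coeff_mk]

lemma pvMk_coeff (S : PowerSeries ℤ) :
    PowerSeries.mk (fun t => PowerSeries.coeff t S) = S := by
  ext n
  simp [PowerSeries.coeff_mk]

-- one Euler factor is multiplication by the geometric series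
lemma pvP_coeff (p : ℕ) (hp : 0 < p) (f : ℕ → ℤ) (n : ℕ) :
    pvP p f n = PowerSeries.coeff n (PowerSeries.mk f * pvG p) := by
  unfold pvG
  rw [pvCoeff_mul]
  have : ∑ j ∈ Finset.range (n + 1), f j * (if p ∣ (n - j) then (1 : ℤ) else 0)
      = ∑ j ∈ (Finset.range (n + 1)).filter (fun j => p ∣ (n - j)), f j := by
    rw [Finset.sum_filter]
    refine Finset.sum_congr rfl (fun j _ => ?_)
    by_cases h : p ∣ (n - j) <;> simp [h]
  rw [this]
  unfold pvP
  refine Finset.sum_nbij' (fun k => n - p * k) (fun j => (n - j) / p) ?_ ?_ ?_ ?_ ?_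
  · intro k hk
    simp only [Finset.mem_range] at hk
    have hpk : p * k ≤ n := by
      calc p * k ≤ p * (n / p) := Nat.mul_le_mul_left p (by omega)
        _ ≤ n := Nat.mul_div_le n p
    simp only [Finset.mem_filter, Finset.mem_range]
    refine ⟨by omega, ?_⟩
    have h2 : n - (n - p * k) = p * k := by omega
    rw [h2]
    exact ⟨k, rfl⟩
  · intro j hj
    simp only [Finset.mem_filter, Finset.mem_range] at hj
    simp only [Finset.mem_range]
    have h2 : (n - j) / p ≤ n / p := Nat.div_le_div_right (by omega)
    omega
  · intro k hk
    simp only [Finset.mem_range] at hk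
    have hpk : p * k ≤ n := by
      calc p * k ≤ p * (n / p) := Nat.mul_le_mul_left p (by omega)
        _ ≤ n := Nat.mul_div_le n p
    simp only []
    have h2 : n - (n - p * k) = p * k := by omega
    rw [h2, Nat.mul_div_cancel_left k hp]
  · intro j hj
    simp only [Finset.mem_filter, Finset.mem_range] at hj
    obtain ⟨t, ht⟩ := hj.2
    simp only []
    rw [ht, Nat.mul_div_cancel_left t hp, ← ht]
    omega
  · intro k _
    rfl

-- A's single in-place pass: invariant over the fold
lemma pvPass_inv (p : ℕ) (hp : 0 < p) (f : ℕ → ℤ) :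
    ∀ (n a : ℕ) (c : List Int), p ≤ a → c.length = a + n →
    (∀ i, i < a → c.getD i 0 = pvP p f i) → (∀ i, a ≤ i → c.getD i 0 = f i) →
    (((List.range' a n).foldl (fun c j => c.set j (c.getD j 0 + c.getD (j - p) 0)) c).length = a + n
     ∧ ∀ i, i < a + n →
        ((List.range' a n).foldl (fun c j => c.set j (c.getD j 0 + c.getD (j - p) 0)) c).getD i 0 = pvP p f i) := by
  intro n
  induction n with
  | zero =>
    intro a c _ hlen hlow _
    simpa [hlen] using hlow
  | succ n ih =>
    intro a c hpa hlen hlow hhigh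
    rw [List.range'_succ]
    simp only [List.foldl_cons]
    set v := c.getD a 0 + c.getD (a - p) 0 with hv
    have hva : v = pvP p f a := by
      rw [hv, hhigh a le_rfl, hlow (a - p) (by omega), ← pvP_rec f hp hpa]
    have hlen1 : (c.set a v).length = (a + 1) + n := by
      rw [List.length_set]; omega
    have hstep := ih (a + 1) (c.set a v) (by omega) hlen1
      (fun i hi => by
        rw [pvGetD_set]
        by_cases hia : a = i
        · subst hia; simp [hlen, hva]
        · rw [if_neg (by tauto)]; exact hlow i (by omega))
      (fun i hi => by
        rw [pvGetD_set, if_neg (by omega)]; exact hhigh i (by omega))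
    constructor
    · rw [hstep.1]; omega
    · intro i hi; exact hstep.2 i (by omega)

-- one full in-place pass over j = p .. N on a list of length N+1
lemma pvPass_eq (p N : ℕ) (hp : 0 < p) (c : List Int) (hlen : c.length = N + 1) :
    (((List.range' p (N + 1 - p)).foldl (fun c j => c.set j (c.getD j 0 + c.getD (j - p) 0)) c).length = N + 1
     ∧ ∀ i, i < N + 1 →
        ((List.range' p (N + 1 - p)).foldl (fun c j => c.set j (c.getD j 0 + c.getD (j - p) 0)) c).getD i 0
          = pvP p (fun t => c.getD t 0) i) := by
  by_cases hpN : p ≤ N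
  · have h := pvPass_inv p hp (fun t => c.getD t 0) (N + 1 - p) p c le_rfl (by omega)
      (fun i hi => (pvP_lt (fun t => c.getD t 0) hi).symm) (fun _ _ => rfl)
    constructor
    · rw [h.1]; omega
    · intro i hi; exact h.2 i (by omega)
  · have : N + 1 - p = 0 := by omega
    rw [this]
    simp only [List.range'_zero, List.foldl_nil]
    exact ⟨hlen, fun i hi => (pvP_lt (fun t => c.getD t 0) (by omega : i < p)).symm⟩

-- a pass preserves pvCoe, multiplying the series by pvG p
lemma pvCoe_pass {N p : ℕ} (hp : 0 < p) {c : List Int} {S : PowerSeries ℤ}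
    (h : pvCoe N c S) :
    pvCoe N ((List.range' p (N + 1 - p)).foldl (fun c j => c.set j (c.getD j 0 + c.getD (j - p) 0)) c)
      (S * pvG p) := by
  obtain ⟨hlen, hval⟩ := h
  have hpass := pvPass_eq p N hp c hlen
  refine ⟨hpass.1, fun i hi => ?_⟩
  rw [hpass.2 i (by omega)]
  have h1 : pvP p (fun t => c.getD t 0) i = pvP p (fun t => PowerSeries.coeff t S) i :=
    pvP_congr (fun t ht => hval t (by omega))
  rw [h1, pvP_coeff p hp _ i, pvMk_coeff]

-- iterated passes multiply by a power of pvG p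
lemma pvCoe_passes {N p : ℕ} (hp : 0 < p) :
    ∀ (m : ℕ) {c : List Int} {S : PowerSeries ℤ}, pvCoe N c S →
    pvCoe N ((List.range m).foldl (fun c _ =>
        (List.range' p (N + 1 - p)).foldl (fun c j => c.set j (c.getD j 0 + c.getD (j - p) 0)) c) c)
      (S * pvG p ^ m) := by
  intro m
  induction m with
  | zero => intro c S h; simpa using h
  | succ m ih =>
    intro c S h
    rw [List.range_succ, List.foldl_append, List.foldl_cons, List.foldl_nil, pow_succ, ← mul_assoc]
    exact pvCoe_pass hp (ih h)

-- B's per-part comprehension also multiplies by pvG p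
lemma pvCoe_map_part {N p : ℕ} (hp : 0 < p) {c : List Int} {S : PowerSeries ℤ}
    (h : pvCoe N c S) :
    pvCoe N ((List.range (N + 1)).map (fun j =>
        (List.range (j / p + 1)).foldl (fun s k => s + c.getD (j - p * k) 0) 0))
      (S * pvG p) := by
  obtain ⟨hlen, hval⟩ := h
  refine ⟨by rw [List.length_map, List.length_range], fun i hi => ?_⟩
  have hilt : i < N + 1 := by omega
  rw [List.getD_eq_getElem _ 0 (by rw [List.length_map, List.length_range]; omega)]
  simp only [List.getElem_map, List.getElem_range]
  rw [pvFoldSum (fun k => c.getD (i - p * k) 0) (i / p + 1) 0, zero_add]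
  have h1 : ∑ k ∈ Finset.range (i / p + 1), c.getD (i - p * k) 0 = pvP p (fun t => c.getD t 0) i := rfl
  rw [h1, pvP_congr (fun t ht => hval t (by omega)), pvP_coeff p hp _ i, pvMk_coeff]

-- B's convolution multiplies the two series
lemma pvCoe_conv {N : ℕ} {a b : List Int} {Sa Sb : PowerSeries ℤ}
    (ha : pvCoe N a Sa) (hb : pvCoe N b Sb) :
    pvCoe N ((List.range (N + 1)).map (fun n =>
        (List.range (n + 1)).foldl (fun s j => s + a.getD j 0 * b.getD (n - j) 0) 0))
      (Sa * Sb) := by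
  refine ⟨by rw [List.length_map, List.length_range], fun i hi => ?_⟩
  rw [List.getD_eq_getElem _ 0 (by rw [List.length_map, List.length_range]; omega)]
  simp only [List.getElem_map, List.getElem_range]
  rw [pvFoldSum (fun j => a.getD j 0 * b.getD (i - j) 0) (i + 1) 0, zero_add]
  rw [← pvMk_coeff Sa, ← pvMk_coeff Sb, pvCoeff_mul]
  refine Finset.sum_congr rfl (fun j hj => ?_)
  rw [Finset.mem_range] at hj
  rw [ha.2 j (by omega), hb.2 (i - j) (by omega)]

-- base list [1,0,…,0] carries the series 1
lemma pvCoe_base (N : ℕ) : pvCoe N ((List.replicate (N + 1) 0).set 0 1) 1 := by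
  refine ⟨by rw [List.length_set, List.length_replicate], fun i hi => ?_⟩
  rw [pvGetD_set]
  by_cases h0 : i = 0
  · subst h0
    simp
  · rw [if_neg (by simp [Ne.symm h0]), List.getD_replicate _ (by omega)]
    simp [PowerSeries.coeff_one, h0]

-- A's fold over the parts
lemma pvA_fold (N : ℕ) :
    ∀ (parts : List ℕ), (∀ p ∈ parts, 0 < p) → ∀ {c : List Int} {S : PowerSeries ℤ}, pvCoe N c S →
    pvCoe N (parts.foldl (fun c part =>
        (List.range 24).foldl (fun c _ =>
          (List.range' part (N + 1 - part)).foldl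
            (fun c j => c.set j (c.getD j 0 + c.getD (j - part) 0)) c) c) c)
      (parts.foldl (fun S p => S * pvG p ^ 24) S) := by
  intro parts
  induction parts with
  | nil => intro _ c S h; exact h
  | cons p ps ih =>
    intro hps c S h
    simp only [List.foldl_cons]
    exact ih (fun q hq => hps q (by simp [hq])) (pvCoe_passes (hps p (by simp)) 24 h)

-- B's fold over the parts
lemma pvB_fold (N : ℕ) :
    ∀ (parts : List ℕ), (∀ p ∈ parts, 0 < p) → ∀ {c : List Int} {S : PowerSeries ℤ}, pvCoe N c S →
    pvCoe N (parts.foldl (fun P part =>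
        (List.range (N + 1)).map (fun j =>
          (List.range (j / part + 1)).foldl (fun s k => s + P.getD (j - part * k) 0) 0)) c)
      (parts.foldl (fun S p => S * pvG p) S) := by
  intro parts
  induction parts with
  | nil => intro _ c S h; exact h
  | cons p ps ih =>
    intro hps c S h
    simp only [List.foldl_cons]
    exact ih (fun q hq => hps q (by simp [hq])) (pvCoe_map_part (hps p (by simp)) h)

-- the two accumulated series agree: ∏ gₚ²⁴ = (∏ gₚ)²⁴
lemma pvPow_fold :
    ∀ (parts : List ℕ) (S : PowerSeries ℤ),
    parts.foldl (fun S p => S * pvG p ^ 24) (S ^ 24)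
      = (parts.foldl (fun S p => S * pvG p) S) ^ 24 := by
  intro parts
  induction parts with
  | nil => intro S; rfl
  | cons p ps ih =>
    intro S
    simp only [List.foldl_cons]
    rw [← mul_pow, ih]

-- ===== VERDICT (by name: the statement is the Claim_ definition above) =====
theorem bosonic_string_spectrum_level_spec : Claim_equal_bosonic_string_spectrum_level := by
  intro max_level _ _
  unfold Spec_bosonic_string_spectrum_level
  unfold bosonic_string_spectrum_level bosonic_string_spectrum_level_alt
  dsimp only
  set N := max_level.toNat with hN
  have hparts : ∀ p ∈ List.range' 1 N, 0 < p := fun p hp => by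
    have := (List.mem_range'_1.mp hp).1; omega
  have hA := pvA_fold N (List.range' 1 N) hparts (pvCoe_base N)
  have hB0 := pvB_fold N (List.range' 1 N) hparts (pvCoe_base N)
  set Q := (List.range' 1 N).foldl (fun S p => S * pvG p) 1 with hQ
  have hB2 := pvCoe_conv hB0 hB0
  have hB4 := pvCoe_conv hB2 hB2
  have hB8 := pvCoe_conv hB4 hB4
  have hB16 := pvCoe_conv hB8 hB8
  have hBc := pvCoe_conv hB16 hB8
  have hSeq : (List.range' 1 N).foldl (fun S p => S * pvG p ^ 24) 1 = Q * Q * (Q * Q) * (Q * Q * (Q * Q)) * (Q * Q * (Q * Q) * (Q * Q * (Q * Q))) * (Q * Q * (Q * Q) * (Q * Q * (Q * Q))) := by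
    have h1 : (1 : PowerSeries ℤ) = 1 ^ 24 := by rw [one_pow]
    rw [h1, pvPow_fold, ← hQ]
    ring
  apply List.ext_getElem
  · simp
  · intro i h1 h2
    simp only [List.getElem_map, List.getElem_range]
    have hiN : i < N + 1 := by simpa using h1
    congr 2
    rw [hA.2 i (by omega), hBc.2 i (by omega), hSeq]
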